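-- pv_equiv track=rewrite | github.com/emretezel/pyvalue | src/pyvalue/metrics/fundamental_consistency.py | _combine_currency
-- ===== SOURCE A (Python) =====
-- from typing import Optional, Sequence
--
-- def _combine_currency(values: Sequence[Optional[str]]) -> Optional[str]:
--     merged: Optional[str] = None
--     for value in values:
--         if not value:
--             continue
--         if merged is None:
--             merged = value
--         elif merged != value:
--             return None
--     return merged
-- ===== SOURCE B (Python) =====
-- from typing import Optional, Sequence
--
-- def _combine_currency(values: Sequence[Optional[str]]) -> Optional[str]:
--     distinct = {v for v in values if v}
--     if len(distinct) == 1: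
--         return next(iter(distinct))
--     return None
-- ===== Notes on version B (the rewrite author's own statement) =====
-- stated objective: idiomatic
-- what changed: Replaces the stateful early-exit loop with per-element comparisons by one set comprehension of the distinct truthy values followed by a single cardinality test.
import Mathlib
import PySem

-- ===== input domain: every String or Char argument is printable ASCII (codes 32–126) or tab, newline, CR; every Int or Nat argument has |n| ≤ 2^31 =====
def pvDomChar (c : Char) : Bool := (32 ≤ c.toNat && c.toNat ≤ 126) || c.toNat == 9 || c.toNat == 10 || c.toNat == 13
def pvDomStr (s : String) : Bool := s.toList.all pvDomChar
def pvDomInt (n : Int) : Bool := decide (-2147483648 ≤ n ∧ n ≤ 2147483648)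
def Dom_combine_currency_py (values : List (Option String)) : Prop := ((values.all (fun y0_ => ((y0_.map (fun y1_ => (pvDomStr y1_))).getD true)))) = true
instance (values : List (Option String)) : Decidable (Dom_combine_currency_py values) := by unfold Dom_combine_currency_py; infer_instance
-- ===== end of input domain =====

-- B replaces A's stateful early-exit pairwise-comparison loop with a set comprehension of the
-- distinct truthy values and a single cardinality test (idiomatic; same cost).


-- ===== PORT A =====
-- the for-loop over `values` with the mutable `merged`; `return None` is the early exit.
def combineLoopA : List (Option String) → Option String → Option String
  | [], merged => merged
  | v :: rest, merged =>
    if v.getD "" = "" then combineLoopA rest merged           -- `if not value: continue` (None or "" is falsy)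
    else
      match merged with
      | none => combineLoopA rest (some (v.getD ""))
      | some m => if m ≠ v.getD "" then none else combineLoopA rest merged

def combine_currency_py (values : List (Option String)) : Option String :=
  combineLoopA values none

-- ===== PORT B =====
-- `{v for v in values if v}` then the len-1 test; `next(iter(distinct))` on a singleton set is its sole element.
def combine_currency_py_alt (values : List (Option String)) : Option String :=
  let distinct : PySem.Set String :=
    PySem.Set.ofList (values.filterMap (fun v => if v.getD "" = "" then none else some (v.getD "")))
  match distinct with
  | [x] => some x
  | _ => none

-- ===== PRECONDITION & SPEC =====
def Spec_combine_currency_py (values : List (Option String)) (out : Option String) : Prop := out = combine_currency_py_alt values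
instance (values : List (Option String)) (out : Option String) : Decidable (Spec_combine_currency_py values out) := by unfold Spec_combine_currency_py; infer_instance

-- ===== CLAIM (what is proved, stated in full; the proofs are below) =====
def Claim_equal_combine_currency_py : Prop := ∀ (values : List (Option String)), Dom_combine_currency_py values → Spec_combine_currency_py values (combine_currency_py values)

-- ===== LEMMAS AND PROOFS =====

-- the truthy values of the input, in order
def truthyVals (values : List (Option String)) : List String :=
  values.filterMap (fun v => if v.getD "" = "" then none else some (v.getD ""))

theorem truthyVals_cons (v : Option String) (rest : List (Option String)) :
    truthyVals (v :: rest) =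
      if v.getD "" = "" then truthyVals rest else v.getD "" :: truthyVals rest := by
  by_cases h : v.getD "" = "" <;> simp [truthyVals, h]

theorem combineLoopA_some (values : List (Option String)) (m : String) :
    combineLoopA values (some m) =
      if (truthyVals values).all (· == m) then some m else none := by
  induction values with
  | nil => simp [combineLoopA, truthyVals]
  | cons v rest ih =>
    rw [combineLoopA, truthyVals_cons]
    by_cases h : v.getD "" = ""
    · simp [h, ih]
    · simp only [if_neg h]
      by_cases hm : m = v.getD ""
      · subst hm; rw [ih]; simp
      · have : m ≠ v.getD "" := hm
        simp [this, List.all_cons, Ne.symm hm]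

theorem combineLoopA_none (values : List (Option String)) :
    combineLoopA values none =
      match truthyVals values with
      | [] => none
      | s :: rest => if rest.all (· == s) then some s else none := by
  induction values with
  | nil => simp [combineLoopA, truthyVals]
  | cons v rest ih =>
    rw [combineLoopA, truthyVals_cons]
    by_cases h : v.getD "" = ""
    · simp [h, ih]
    · simp [h, combineLoopA_some]

theorem foldl_add_all_eq (s : String) (rest : List String) (h : rest.all (· == s)) :
    rest.foldl PySem.Set.add [s] = [s] := by
  induction rest with
  | nil => rfl
  | cons t ts ih =>
    simp only [List.all_cons, Bool.and_eq_true, beq_iff_eq] at h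
    obtain ⟨hts, hall⟩ := h
    have : PySem.Set.add [s] t = [s] := by
      simp [PySem.Set.add, PySem.Set.contains, hts]
    simp only [List.foldl_cons, this]
    exact ih hall

theorem ofList_cons_eq_foldl (s : String) (rest : List String) :
    PySem.Set.ofList (s :: rest) = rest.foldl PySem.Set.add [s] := by
  simp [PySem.Set.ofList_eq_foldl, List.foldl_cons, PySem.Set.add, PySem.Set.contains]

theorem alt_eq_match (values : List (Option String)) :
    combine_currency_py_alt values =
      match truthyVals values with
      | [] => none
      | s :: rest => if rest.all (· == s) then some s else none := by
  unfold combine_currency_py_alt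
  show (match PySem.Set.ofList (truthyVals values) with
        | [x] => some x | _ => none) = _
  cases hl : truthyVals values with
  | nil => rfl
  | cons s rest =>
    show (match PySem.Set.ofList (s :: rest) with
          | [x] => some x | _ => none) =
        if rest.all (· == s) then some s else none
    by_cases hall : rest.all (· == s)
    · rw [if_pos hall, ofList_cons_eq_foldl, foldl_add_all_eq s rest hall]
    · -- some element of rest differs from s; ofList contains both it and s, so it is not a singleton
      simp only [List.all_eq_true, beq_iff_eq] at hall
      push Not at hall
      obtain ⟨t, ht, hts⟩ := hall
      have hsmem : s ∈ PySem.Set.ofList (s :: rest) := by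
        rw [PySem.Set.mem_ofList]; exact List.mem_cons_self
      have htmem : t ∈ PySem.Set.ofList (s :: rest) := by
        rw [PySem.Set.mem_ofList]; exact List.mem_cons_of_mem _ ht
      rw [if_neg (by simp only [List.all_eq_true, beq_iff_eq]; push Not; exact ⟨t, ht, hts⟩)]
      cases ho : PySem.Set.ofList (s :: rest) with
      | nil => rw [ho] at hsmem
      | cons x xs =>
        cases xs with
        | nil =>
          rw [ho] at hsmem htmem
          simp at hsmem htmem
          exact absurd (hsmem ▸ htmem) hts
        | cons y ys => rfl

-- ===== VERDICT (by name: the statement is the Claim_ definition above) =====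
theorem combine_currency_py_spec : Claim_equal_combine_currency_py := by
  intro values _
  show combine_currency_py values = combine_currency_py_alt values
  rw [combine_currency_py, combineLoopA_none, alt_eq_match]
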